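-- pv_equiv track=rewrite | github.com/dbudaghyan/qcluster | qcluster/dataset_analyzer.py | create_category_intent_hierarchy
-- ===== SOURCE A (Python) =====
-- def create_category_intent_hierarchy(
--     category_intent_tuples: set[tuple[str, str]],
-- ) -> dict[str, set[str]]:
--     """
--     Create a hierarchy of categories and their associated intents.
--     Args:
--         category_intent_tuples (set[tuple[str, str]]): A set of tuples
--          where each tuple contains a category and intent.
--     Returns:
--         dict: A dictionary where keys are categories and values are sets of intents
--          associated with those categories.
--     """
--     hierarchy = {}
--     for category, intent in category_intent_tuples:
--         if category not in hierarchy: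
--             hierarchy[category] = set()
--         hierarchy[category].add(intent)
--     return hierarchy
-- ===== SOURCE B (Python) =====
-- def create_category_intent_hierarchy(category_intent_tuples):
--     # Alternative decomposition: first collect the distinct categories in first-occurrence
--     # order, then build each category's intent set by one comprehension pass over the input.
--     categories = list(dict.fromkeys(c for c, _ in category_intent_tuples))
--     return {c: {i for c2, i in category_intent_tuples if c2 == c} for c in categories}
-- ===== Notes on version B (the rewrite author's own statement) =====
-- stated objective: alternative
-- what changed: Instead of A's single pass that conditionally seeds and mutates a dict entry per tuple, B first computes the deduplicated category list and then builds each category's intent set with an independent filtering comprehension over the input (a dict comprehension over distinct keys).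
import Mathlib
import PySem

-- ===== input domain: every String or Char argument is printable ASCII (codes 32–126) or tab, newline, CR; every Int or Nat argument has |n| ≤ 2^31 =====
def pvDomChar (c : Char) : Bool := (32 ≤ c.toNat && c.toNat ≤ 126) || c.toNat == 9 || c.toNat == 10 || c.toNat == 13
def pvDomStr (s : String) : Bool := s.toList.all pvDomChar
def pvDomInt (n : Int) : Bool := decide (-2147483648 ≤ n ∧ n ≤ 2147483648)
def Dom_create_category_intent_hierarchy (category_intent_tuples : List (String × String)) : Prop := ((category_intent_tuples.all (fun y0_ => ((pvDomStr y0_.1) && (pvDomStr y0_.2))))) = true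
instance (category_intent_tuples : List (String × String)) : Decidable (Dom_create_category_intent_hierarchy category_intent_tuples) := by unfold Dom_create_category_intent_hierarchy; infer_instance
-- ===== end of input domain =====

-- B replaces A's one-pass conditional dict mutation by "dedup the categories, then one
-- filtering comprehension per category" — an alternative decomposition, not claimed faster.


-- ===== PORT A =====
-- for category, intent in tuples: if category not in hierarchy: hierarchy[category] = set();
-- hierarchy[category].add(intent)   (returned dict as its items list)
def create_category_intent_hierarchy (category_intent_tuples : List (String × String)) : List (String × List String) :=
  (category_intent_tuples.foldl
    (fun hierarchy p =>
      let hierarchy := if hierarchy.contains p.1 then hierarchy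
                       else hierarchy.insert p.1 PySem.Set.empty
      hierarchy.modify p.1 PySem.Set.empty (fun s => PySem.Set.add s p.2))
    PySem.Dict.empty).items

-- ===== PORT B =====
-- categories = list(dict.fromkeys(c for c,_ in tuples));
-- {c: {i for c2,i in tuples if c2 == c} for c in categories}  (distinct keys, so the dict is this list)
def create_category_intent_hierarchy_alt (category_intent_tuples : List (String × String)) : List (String × List String) :=
  (PySem.List.dedup (category_intent_tuples.map (fun p => p.1))).map
    (fun c => (c, PySem.Set.ofList
        (category_intent_tuples.filterMap (fun p => if p.1 = c then some p.2 else none))))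

-- ===== PRECONDITION & SPEC =====
def Spec_create_category_intent_hierarchy (category_intent_tuples : List (String × String)) (out : List (String × List String)) : Prop := out = create_category_intent_hierarchy_alt category_intent_tuples
instance (category_intent_tuples : List (String × String)) (out : List (String × List String)) : Decidable (Spec_create_category_intent_hierarchy category_intent_tuples out) := by unfold Spec_create_category_intent_hierarchy; infer_instance

-- ===== CLAIM (what is proved, stated in full; the proofs are below) =====
def Claim_equal_create_category_intent_hierarchy : Prop := ∀ (category_intent_tuples : List (String × String)), Dom_create_category_intent_hierarchy category_intent_tuples → Spec_create_category_intent_hierarchy category_intent_tuples (create_category_intent_hierarchy category_intent_tuples)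

-- ===== LEMMAS AND PROOFS =====

-- the intents paired with category c, in input order
def pvIntents (c : String) (xs : List (String × String)) : List String :=
  xs.filterMap (fun p => if p.1 = c then some p.2 else none)

-- A's loop body, rewritten as a single overwrite-insert
lemma stepA_eq (d : PySem.Dict String (PySem.Set String)) (p : String × String) :
    (let d' := if d.contains p.1 then d else d.insert p.1 PySem.Set.empty
     d'.modify p.1 PySem.Set.empty (fun s => PySem.Set.add s p.2))
    = d.insert p.1 (PySem.Set.add (d.getD p.1 PySem.Set.empty) p.2) := by
  by_cases h : d.contains p.1
  · simp [h, PySem.Dict.modify]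
  · have h' : d.contains p.1 = false := by simpa using h
    simp [h', PySem.Dict.modify, PySem.Dict.getD_insert_self,
      PySem.Dict.insert_insert_self, PySem.Dict.getD_of_not_contains, pysem]

lemma foldA_getD (xs : List (String × String))
    (d : PySem.Dict String (PySem.Set String)) (c : String) :
    (xs.foldl (fun d p => d.insert p.1 (PySem.Set.add (d.getD p.1 PySem.Set.empty) p.2)) d).getD
        c PySem.Set.empty
      = PySem.Set.update (d.getD c PySem.Set.empty) (pvIntents c xs) := by
  induction xs generalizing d with
  | nil => simp [pvIntents, PySem.Set.update]
  | cons p xs ih =>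
      simp only [List.foldl_cons, ih]
      by_cases hc : p.1 = c
      · subst hc
        simp [pvIntents, PySem.Dict.getD_insert_self, PySem.Set.update_cons]
      · have hc' : ¬ c = p.1 := fun e => hc e.symm
        simp [pvIntents, PySem.Dict.getD_insert, hc', hc]

lemma foldA_keys (xs : List (String × String)) :
    (xs.foldl (fun d p => d.insert p.1 (PySem.Set.add (d.getD p.1 PySem.Set.empty) p.2))
        (PySem.Dict.empty : PySem.Dict String (PySem.Set String))).keys
      = PySem.Set.ofList (xs.map (fun p => p.1)) := by
  rw [PySem.Dict.keys_foldl_insert_key]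
  simp [PySem.Set.update_nil_left]

-- ===== VERDICT (by name: the statement is the Claim_ definition above) =====
theorem create_category_intent_hierarchy_spec : Claim_equal_create_category_intent_hierarchy := by
  intro xs _
  show create_category_intent_hierarchy xs = create_category_intent_hierarchy_alt xs
  unfold create_category_intent_hierarchy create_category_intent_hierarchy_alt
  have hstep : (fun (hierarchy : PySem.Dict String (PySem.Set String)) (p : String × String) =>
      let hierarchy := if hierarchy.contains p.1 then hierarchy
                       else hierarchy.insert p.1 PySem.Set.empty
      hierarchy.modify p.1 PySem.Set.empty (fun s => PySem.Set.add s p.2))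
      = fun d p => d.insert p.1 (PySem.Set.add (d.getD p.1 PySem.Set.empty) p.2) :=
    funext fun d => funext fun p => stepA_eq d p
  rw [hstep]
  set F := (xs.foldl (fun d p => d.insert p.1 (PySem.Set.add (d.getD p.1 PySem.Set.empty) p.2))
      (PySem.Dict.empty : PySem.Dict String (PySem.Set String))) with hF
  have hnd : F.keys.Nodup := by
    rw [hF, foldA_keys]; exact PySem.Set.nodup_ofList _
  rw [PySem.Dict.items_eq_map_keys F hnd PySem.Set.empty, hF, foldA_keys,
      PySem.List.dedup_eq_ofList]
  refine List.map_congr_left (fun c _ => ?_)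
  rw [foldA_getD]
  simp [pvIntents, PySem.Set.update_nil_left, PySem.Set.empty]
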